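-- pv_equiv track=rewrite | github.com/lam-ntt/practice-at-ptit | python/PY01024_chan_le.py | check
-- ===== SOURCE A (Python) =====
-- def check(n):
--     sum=0
--     cur=-1
--     while n!=0:
--         if cur!=-1 and abs(n%10-cur)!=2: return False
--         cur=n%10
--         sum+=n%10
--         n//=10
--     return sum%10==0
-- ===== SOURCE B (Python) =====
-- def check(n):
--     s = str(n)
--     d = [ord(c) - 48 for c in s]
--     return all(abs(x - y) == 2 for x, y in zip(d, d[1:])) and sum(d) % 10 == 0
-- ===== Notes on version B (the rewrite author's own statement) =====
-- stated objective: alternative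
-- what changed: A's fused arithmetic loop (n%10 / n//=10 with previous-digit state, running sum and early return) is replaced by rendering n as its decimal string via str(n), mapping each character to its code-point value, and combining two independent passes over that list (an all() over adjacent pairs and a digit-sum divisibility test); negative n needs no special case because the minus-sign character maps to a negative value that is never at the required absolute distance from the leading digit, so the adjacency pass fails exactly as A's loop returns False on every negative n.
import Mathlib
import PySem

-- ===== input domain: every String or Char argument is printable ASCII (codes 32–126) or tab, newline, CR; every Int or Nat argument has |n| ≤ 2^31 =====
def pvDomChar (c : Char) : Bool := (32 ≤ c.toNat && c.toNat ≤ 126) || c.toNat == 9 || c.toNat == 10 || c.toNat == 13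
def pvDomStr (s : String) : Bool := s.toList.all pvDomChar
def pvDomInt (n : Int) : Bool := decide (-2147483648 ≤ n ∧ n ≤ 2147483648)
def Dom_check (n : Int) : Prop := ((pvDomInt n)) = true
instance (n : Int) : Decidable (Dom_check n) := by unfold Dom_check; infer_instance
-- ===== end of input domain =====

-- B replaces A's fused arithmetic digit loop (n%10 / n//=10 with early return) by rendering n
-- with str(n), mapping characters to ord(c)-48, and two independent passes (adjacency, digit sum);
-- proved equal on all Int inputs (objective: alternative, same cost).


-- ===== PORT A =====
-- A's while loop with fuel n.natAbs + 2 (enough for every n ≥ 0; for n < 0 the Python loop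
-- always returns False before reaching 0, and the fuel-exhaustion fallback is that same False).
def checkGo : Nat → Int → Int → Int → Bool
  | 0, n, s, _ => if n = 0 then decide (PySem.Int.mod s 10 = 0) else false
  | f + 1, n, s, c =>
    if n = 0 then decide (PySem.Int.mod s 10 = 0)
    else if c ≠ -1 ∧ (PySem.Int.mod n 10 - c).natAbs ≠ 2 then false
    else checkGo f (PySem.Int.floordiv n 10) (s + PySem.Int.mod n 10) (PySem.Int.mod n 10)

def check (n : Int) : Bool := checkGo (n.natAbs + 2) n 0 (-1)

-- ===== PORT B =====
-- str(n) is PySem.Int.toChars; ord(c) is c.toNat; d[1:] is d.drop 1; sum is List.sum.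
def check_alt (n : Int) : Bool :=
  let d := (PySem.Int.toChars n).map (fun c => ((c.toNat : Int) - 48))
  ((d.zip (d.drop 1)).all (fun p => (p.1 - p.2).natAbs == 2))
    && (PySem.Int.mod d.sum 10 == 0)

-- ===== PRECONDITION & SPEC =====
def Spec_check (n : Int) (out : Bool) : Prop := out = check_alt n
instance (n : Int) (out : Bool) : Decidable (Spec_check n out) := by unfold Spec_check; infer_instance

-- ===== CLAIM (what is proved, stated in full; the proofs are below) =====
def Claim_equal_check : Prop := ∀ (n : Int), Dom_check n → Spec_check n (check n)

-- ===== LEMMAS AND PROOFS =====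

-- Little-endian digit list of n (proof helper linking the two ports).
def digitsRev : Nat → Int → List Int
  | 0, _ => []
  | f + 1, n =>
    if n = 0 then []
    else PySem.Int.mod n 10 :: digitsRev f (PySem.Int.floordiv n 10)

-- A's adjacency logic, abstracted over the digit list (proof helper only).
def adjA (c : Int) : List Int → Bool
  | [] => true
  | d :: ds => if c ≠ -1 ∧ (d - c).natAbs ≠ 2 then false else adjA d ds

-- the adjacency relation both programs test
def adjR (a b : Int) : Prop := (a - b).natAbs = 2

theorem digitsRev_zero (f : Nat) : digitsRev f 0 = [] := by
  cases f <;> simp [digitsRev]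

theorem digitsRev_bounds (f : Nat) : ∀ (n : Int), ∀ x ∈ digitsRev f n, 0 ≤ x ∧ x < 10 := by
  induction f with
  | zero => intro n x hx; simp [digitsRev] at hx
  | succ f ih =>
    intro n x hx
    unfold digitsRev at hx
    split at hx
    · simp at hx
    · simp only [List.mem_cons] at hx
      rcases hx with h | h
      · subst h
        exact ⟨PySem.Int.mod_nonneg n (b := 10) (by norm_num),
               PySem.Int.mod_lt n (b := 10) (by norm_num)⟩
      · exact ih _ x h

theorem digitsRev_fuel (f : Nat) : ∀ (g : Nat) (n : Int), 0 ≤ n → n < (10:Int) ^ f →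
    n < (10:Int) ^ g → digitsRev f n = digitsRev g n := by
  induction f with
  | zero =>
    intro g n hn hf _
    have : n = 0 := by simp only [pow_zero] at hf; omega
    subst this; rw [digitsRev_zero, digitsRev_zero]
  | succ f ih =>
    intro g n hn hf hg
    by_cases h0 : n = 0
    · subst h0; rw [digitsRev_zero, digitsRev_zero]
    · cases g with
      | zero =>
        exfalso; simp only [pow_zero] at hg; omega
      | succ g =>
        have hmod : PySem.Int.mod n 10 = n % 10 :=
          PySem.Int.mod_eq_emod_of_pos (a := n) (b := 10) (by norm_num)
        have hdiv : PySem.Int.floordiv n 10 = n / 10 :=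
          PySem.Int.floordiv_eq_ediv_of_pos (a := n) (b := 10) (by norm_num)
        have hde : 10 * (n / 10) + n % 10 = n := Int.mul_ediv_add_emod n 10
        have hr0 : 0 ≤ n % 10 := Int.emod_nonneg n (by norm_num)
        have hr9 : n % 10 < 10 := Int.emod_lt_of_pos n (by norm_num)
        have hpf : (0:Int) < 10 ^ f := pow_pos (by norm_num) f
        have hpg : (0:Int) < 10 ^ g := pow_pos (by norm_num) g
        have hq0 : 0 ≤ PySem.Int.floordiv n 10 := by rw [hdiv]; omega
        have hqf : PySem.Int.floordiv n 10 < (10:Int) ^ f := by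
          rw [hdiv]; rw [pow_succ] at hf; omega
        have hqg : PySem.Int.floordiv n 10 < (10:Int) ^ g := by
          rw [hdiv]; rw [pow_succ] at hg; omega
        show (if n = 0 then [] else PySem.Int.mod n 10 :: digitsRev f (PySem.Int.floordiv n 10))
            = (if n = 0 then [] else PySem.Int.mod n 10 :: digitsRev g (PySem.Int.floordiv n 10))
        rw [if_neg h0, if_neg h0, ih g _ hq0 hqf hqg]

theorem checkGo_neg (f : Nat) : ∀ (n s c : Int), n < 0 → checkGo f n s c = false := by
  induction f with
  | zero => intro n s c hn; simp [checkGo]; omega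
  | succ f ih =>
    intro n s c hn
    have hdiv : PySem.Int.floordiv n 10 = n / 10 :=
      PySem.Int.floordiv_eq_ediv_of_pos (a := n) (b := 10) (by norm_num)
    have hde : 10 * (n / 10) + n % 10 = n := Int.mul_ediv_add_emod n 10
    have hr0 : 0 ≤ n % 10 := Int.emod_nonneg n (by norm_num)
    have hr9 : n % 10 < 10 := Int.emod_lt_of_pos n (by norm_num)
    have hq : PySem.Int.floordiv n 10 < 0 := by rw [hdiv]; omega
    unfold checkGo
    rw [if_neg (by omega : ¬ n = 0)]
    split
    · rfl
    · exact ih _ _ _ hq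

theorem checkGo_eq (fuel : Nat) : ∀ (n s c : Int), 0 ≤ n → n < (10 : Int) ^ fuel →
    checkGo fuel n s c =
      (if adjA c (digitsRev fuel n) then
        decide (PySem.Int.mod ((digitsRev fuel n).foldl (· + ·) s) 10 = 0)
      else false) := by
  induction fuel with
  | zero =>
    intro n s c hn hlt
    have h1 : n = 0 := by simp only [pow_zero] at hlt; omega
    subst h1
    simp [checkGo, digitsRev, adjA]
  | succ f ih =>
    intro n s c hn hlt
    by_cases h0 : n = 0
    · subst h0; simp [checkGo, digitsRev, adjA]
    · have hmod : PySem.Int.mod n 10 = n % 10 :=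
        PySem.Int.mod_eq_emod_of_pos (a := n) (b := 10) (by norm_num)
      have hdiv : PySem.Int.floordiv n 10 = n / 10 :=
        PySem.Int.floordiv_eq_ediv_of_pos (a := n) (b := 10) (by norm_num)
      have hde : 10 * (n / 10) + n % 10 = n := Int.mul_ediv_add_emod n 10
      have hr0 : 0 ≤ n % 10 := Int.emod_nonneg n (by norm_num)
      have hr9 : n % 10 < 10 := Int.emod_lt_of_pos n (by norm_num)
      have hpow : (10 : Int) ^ (f + 1) = 10 * (10 : Int) ^ f := by ring
      have hq0 : 0 ≤ PySem.Int.floordiv n 10 := by rw [hdiv]; omega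
      have hqlt : PySem.Int.floordiv n 10 < (10 : Int) ^ f := by
        have hpf : (0 : Int) < 10 ^ f := pow_pos (by norm_num) f
        rw [hdiv]; omega
      rw [show checkGo (f + 1) n s c =
            (if n = 0 then decide (PySem.Int.mod s 10 = 0)
             else if c ≠ -1 ∧ (PySem.Int.mod n 10 - c).natAbs ≠ 2 then false
             else checkGo f (PySem.Int.floordiv n 10) (s + PySem.Int.mod n 10)
                    (PySem.Int.mod n 10)) from rfl,
          show digitsRev (f + 1) n =
            (if n = 0 then []
             else PySem.Int.mod n 10 :: digitsRev f (PySem.Int.floordiv n 10)) from rfl,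
          if_neg h0, if_neg h0]
      by_cases hc : c ≠ -1 ∧ (PySem.Int.mod n 10 - c).natAbs ≠ 2
      · rw [if_pos hc]
        have : adjA c (PySem.Int.mod n 10 :: digitsRev f (PySem.Int.floordiv n 10)) = false := by
          show (if c ≠ -1 ∧ (PySem.Int.mod n 10 - c).natAbs ≠ 2 then false
                else adjA (PySem.Int.mod n 10) (digitsRev f (PySem.Int.floordiv n 10))) = false
          rw [if_pos hc]
        rw [this]; simp
      · rw [if_neg hc, ih _ (s + PySem.Int.mod n 10) (PySem.Int.mod n 10) hq0 hqlt]
        have : adjA c (PySem.Int.mod n 10 :: digitsRev f (PySem.Int.floordiv n 10)) =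
            adjA (PySem.Int.mod n 10) (digitsRev f (PySem.Int.floordiv n 10)) := by
          show (if c ≠ -1 ∧ (PySem.Int.mod n 10 - c).natAbs ≠ 2 then false
                else adjA (PySem.Int.mod n 10) (digitsRev f (PySem.Int.floordiv n 10))) = _
          rw [if_neg hc]
        rw [this]
        simp [List.foldl]

theorem nat_lt_ten_pow (k : Nat) : (k : Int) < (10 : Int) ^ k := by
  have h : k < 10 ^ k := Nat.lt_pow_self (by norm_num)
  exact_mod_cast h

-- B's zip-all over adjacent pairs says the digit list is an adjR-chain.
theorem zipAll_iff (L : List Int) :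
    (((L.zip (L.drop 1)).all (fun p => (p.1 - p.2).natAbs == 2)) = true) ↔ List.IsChain adjR L := by
  induction L with
  | nil => simp
  | cons a t ih =>
    cases t with
    | nil => simp
    | cons b t' =>
      simp only [List.drop_succ_cons, List.drop_zero, List.zip_cons_cons, List.all_cons] at ih ⊢
      rw [List.isChain_cons_cons, Bool.and_eq_true, ih]
      constructor
      · rintro ⟨h1, h2⟩; exact ⟨by unfold adjR; simpa using h1, h2⟩
      · rintro ⟨h1, h2⟩; exact ⟨by unfold adjR at h1; simpa using h1, h2⟩

-- A's adjacency scan says the same (once past the initial cur = -1 state).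
theorem adjA_iff : ∀ (L : List Int) (c : Int), (∀ x ∈ L, 0 ≤ x) → c ≠ -1 →
    (adjA c L = true ↔ List.IsChain adjR (c :: L)) := by
  intro L
  induction L with
  | nil => intro c _ _; simp [adjA]
  | cons d ds ih =>
    intro c hnn hc
    have hd0 : 0 ≤ d := hnn d (by simp)
    rw [show adjA c (d :: ds) =
          (if c ≠ -1 ∧ (d - c).natAbs ≠ 2 then false else adjA d ds) from rfl]
    rw [List.isChain_cons_cons]
    by_cases h2 : (d - c).natAbs = 2
    · rw [if_neg (by tauto), ih d (fun x hx => hnn x (by simp [hx])) (by omega)]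
      have hR : adjR c d := by unfold adjR; omega
      simp [hR]
    · rw [if_pos ⟨hc, h2⟩]
      have hR : ¬ adjR c d := by unfold adjR; omega
      simp [hR]

-- adjR is symmetric, so the chain property survives reversal.
theorem chain_reverse (L : List Int) :
    List.IsChain adjR L.reverse ↔ List.IsChain adjR L := by
  rw [List.isChain_reverse]
  have : (fun a b => adjR b a) = adjR := by
    funext a b; exact propext (by unfold adjR; omega)
  rw [this]

-- value of a digit character
theorem digitChar_val (m : Nat) (h : m < 10) : ((Nat.digitChar m).toNat : Int) - 48 = (m : Int) := by
  interval_cases m <;> rfl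

-- Nat.toDigitsCore (the engine of str(n)) produces exactly the reversed digitsRev list.
theorem core_eq (f : Nat) : ∀ (m : Nat) (acc : List Char), 0 < m → m < 10 ^ f →
    Nat.toDigitsCore 10 f m acc =
      ((digitsRev f (m : Int)).reverse.map (fun d => Nat.digitChar d.toNat)) ++ acc := by
  induction f with
  | zero => intro m acc hm hf; omega
  | succ f ih =>
    intro m acc hm hf
    have hcast : ((m : Int)) ≠ 0 := by
      have : (0:Int) < (m : Int) := by exact_mod_cast hm
      omega
    have hdr : digitsRev (f + 1) (m : Int)
        = ((m % 10 : Nat) : Int) :: digitsRev f ((m / 10 : Nat) : Int) := by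
      show (if (m : Int) = 0 then []
            else PySem.Int.mod (m : Int) 10 :: digitsRev f (PySem.Int.floordiv (m : Int) 10)) = _
      rw [if_neg hcast]
      rw [show ((10:Int)) = ((10:Nat):Int) from rfl, PySem.Int.mod_natCast, PySem.Int.floordiv_natCast]
    rw [show Nat.toDigitsCore 10 (f + 1) m acc =
          (if m / 10 = 0 then Nat.digitChar (m % 10) :: acc
           else Nat.toDigitsCore 10 f (m / 10) (Nat.digitChar (m % 10) :: acc)) from rfl]
    by_cases hq : m / 10 = 0
    · rw [if_pos hq, hdr, hq]
      simp [digitsRev_zero]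
      have hcm : (((m : Int)) % 10).toNat = m % 10 := by omega
      rw [hcm]
    · rw [if_neg hq, ih (m / 10) _ (Nat.pos_of_ne_zero hq)
          (by rw [pow_succ] at hf; omega), hdr]
      simp
      have hcm : (((m : Int)) % 10).toNat = m % 10 := by omega
      rw [hcm]

-- str(n) for n > 0, in digitsRev terms
theorem toChars_pos (n : Int) (h : 0 < n) :
    PySem.Int.toChars n
      = ((digitsRev (n.toNat + 1) n).reverse.map (fun d => Nat.digitChar d.toNat)) := by
  have hn0 : ¬ n < 0 := by omega
  have hmpos : 0 < n.toNat := by omega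
  have hmlt : n.toNat < 10 ^ (n.toNat + 1) := by
    have h10 : n.toNat < 10 ^ n.toNat := Nat.lt_pow_self (by norm_num)
    calc n.toNat < 10 ^ n.toNat := h10
      _ ≤ 10 ^ (n.toNat + 1) := Nat.pow_le_pow_right (by norm_num) (by omega)
  have hns : ((n.toNat : Int)) = n := Int.toNat_of_nonneg (by omega)
  show (if n < 0 then '-' :: Nat.toDigits 10 n.natAbs else Nat.toDigits 10 n.toNat) = _
  rw [if_neg hn0]
  show Nat.toDigitsCore 10 (n.toNat + 1) n.toNat [] = _
  rw [core_eq (n.toNat + 1) n.toNat [] hmpos hmlt, hns, List.append_nil]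

-- mapped digit characters give back the digits
theorem map_digit_chars (L : List Int) (hb : ∀ x ∈ L, 0 ≤ x ∧ x < 10) :
    (L.map (fun d => Nat.digitChar d.toNat)).map (fun c => ((c.toNat : Int) - 48)) = L := by
  rw [List.map_map]
  have : ∀ x ∈ L, ((fun c : Char => ((c.toNat : Int) - 48)) ∘ (fun d : Int => Nat.digitChar d.toNat)) x = id x := by
    intro x hx
    obtain ⟨h0, h9⟩ := hb x hx
    have hlt : x.toNat < 10 := by omega
    have := digitChar_val x.toNat hlt
    simp only [Function.comp, id]
    rw [this]
    omega
  rw [List.map_congr_left this, List.map_id]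

theorem foldl_add_eq_sum (L : List Int) : L.foldl (· + ·) 0 = L.sum := by
  rw [List.sum_eq_foldl]

-- ===== VERDICT (by name: the statement is the Claim_ definition above) =====
theorem check_spec : Claim_equal_check := by
  intro n _
  unfold Spec_check
  rcases lt_trichotomy n 0 with hneg | hzero | hpos
  · -- n < 0 : A returns False; B's first pair is ('-', leading digit), never at distance 2
    rw [show check n = checkGo (n.natAbs + 2) n 0 (-1) from rfl, checkGo_neg _ _ _ _ hneg]
    have hm : 0 < n.natAbs := by omega
    have hmlt : n.natAbs < 10 ^ (n.natAbs + 1) := by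
      have h10 : n.natAbs < 10 ^ n.natAbs := Nat.lt_pow_self (by norm_num)
      calc n.natAbs < 10 ^ n.natAbs := h10
        _ ≤ 10 ^ (n.natAbs + 1) := Nat.pow_le_pow_right (by norm_num) (by omega)
    have htc : PySem.Int.toChars n = '-' :: Nat.toDigits 10 n.natAbs := by
      show (if n < 0 then '-' :: Nat.toDigits 10 n.natAbs else Nat.toDigits 10 n.toNat) = _
      rw [if_pos hneg]
    have htd : Nat.toDigits 10 n.natAbs
        = ((digitsRev (n.natAbs + 1) (n.natAbs : Int)).reverse.map (fun d => Nat.digitChar d.toNat)) := by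
      show Nat.toDigitsCore 10 (n.natAbs + 1) n.natAbs [] = _
      rw [core_eq (n.natAbs + 1) n.natAbs [] hm hmlt, List.append_nil]
    set L := digitsRev (n.natAbs + 1) (n.natAbs : Int) with hL
    have hLne : L ≠ [] := by
      rw [hL]
      show (if ((n.natAbs : Int)) = 0 then []
            else PySem.Int.mod (n.natAbs : Int) 10
              :: digitsRev n.natAbs (PySem.Int.floordiv (n.natAbs : Int) 10)) ≠ []
      rw [if_neg (by exact_mod_cast by omega)]
      simp
    unfold check_alt
    dsimp only
    rw [htc, htd]
    simp only [List.map_cons]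
    rw [map_digit_chars L.reverse (fun x hx => digitsRev_bounds _ _ x (List.mem_reverse.mp hx))]
    rcases hrev : L.reverse with _ | ⟨h, t⟩
    · exact absurd (by simpa using hrev) hLne
    · have hh : h ∈ L := by
        have : h ∈ L.reverse := by rw [hrev]; simp
        exact List.mem_reverse.mp this
      obtain ⟨h0, h9⟩ := digitsRev_bounds _ _ h hh
      have hfail : ((('-'.toNat : Int) - 48) - h).natAbs ≠ 2 := by
        show (((45 : Int)) - 48 - h).natAbs ≠ 2
        omega
      simp only [List.drop_succ_cons, List.drop_zero, List.zip_cons_cons, List.all_cons]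
      have : ((((('-'.toNat : Int) - 48)) - h).natAbs == 2) = false := by
        simpa using hfail
      rw [this]
      simp
  · -- n = 0
    subst hzero; decide
  · -- n > 0
    have hnn : (0:Int) ≤ n := by omega
    have hlt2 : n < (10 : Int) ^ (n.natAbs + 2) := by
      calc n = ((n.toNat : Nat) : Int) := (Int.toNat_of_nonneg hnn).symm
        _ < (10:Int) ^ n.toNat := nat_lt_ten_pow n.toNat
        _ ≤ (10:Int) ^ (n.natAbs + 2) := by
            apply pow_le_pow_right₀ (by norm_num)
            omega
    have hlt1 : n < (10 : Int) ^ (n.toNat + 1) := by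
      calc n = ((n.toNat : Nat) : Int) := (Int.toNat_of_nonneg hnn).symm
        _ < (10:Int) ^ n.toNat := nat_lt_ten_pow n.toNat
        _ ≤ (10:Int) ^ (n.toNat + 1) := by
            apply pow_le_pow_right₀ (by norm_num)
            omega
    rw [show check n = checkGo (n.natAbs + 2) n 0 (-1) from rfl,
        checkGo_eq _ n 0 (-1) hnn hlt2]
    set L := digitsRev (n.natAbs + 2) n with hLdef
    have hfuel : digitsRev (n.toNat + 1) n = L :=
      digitsRev_fuel _ _ _ hnn hlt1 hlt2
    unfold check_alt
    dsimp only
    rw [toChars_pos n hpos, hfuel,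
        map_digit_chars L.reverse (fun x hx => digitsRev_bounds _ _ x (List.mem_reverse.mp hx))]
    have hnnL : ∀ x ∈ L, 0 ≤ x := fun x hx => (digitsRev_bounds _ _ x hx).1
    have hadj : adjA (-1) L = ((L.reverse.zip (L.reverse.drop 1)).all
        (fun p => (p.1 - p.2).natAbs == 2)) := by
      rw [Bool.eq_iff_iff, zipAll_iff, chain_reverse]
      rcases hLc : L with _ | ⟨d0, rest⟩
      · simp [adjA]
      · have hd0 : 0 ≤ d0 := hnnL d0 (by rw [hLc]; simp)
        have h1 : adjA (-1) (d0 :: rest) = adjA d0 rest := by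
          show (if (-1 : Int) ≠ -1 ∧ (d0 - -1).natAbs ≠ 2 then false else adjA d0 rest) = _
          simp
        rw [h1]
        exact adjA_iff rest d0 (fun x hx => hnnL x (by rw [hLc]; simp [hx])) (by omega)
    rw [← hadj, List.sum_reverse]
    cases hA : adjA (-1) L
    · simp
    · simp only [if_pos, Bool.true_and]
      rw [foldl_add_eq_sum, Bool.eq_iff_iff]
      simp
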